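-- pv_equiv track=rewrite | github.com/irineos1995/ULint | main.py | distinguish_copy_and_original
-- ===== SOURCE A (Python) =====
-- def distinguish_copy_and_original(files_list):
--     copy = []
--     original = []
--     for file in files_list:
--         if 'copy' in file.lower():
--             copy.append(file)
--         else:
--             original.append(file)
--     return original + copy
-- ===== SOURCE B (Python) =====
-- def distinguish_copy_and_original(files_list):
--     return sorted(files_list, key=lambda f: 'copy' in f.lower())
-- ===== Notes on version B (the rewrite author's own statement) =====
-- stated objective: idiomatic
-- what changed: Replaced the two-accumulator partition loop with a single stable sort over the boolean key 'copy' in f.lower(); stability keeps within-group order and False<True puts originals first.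
import Mathlib
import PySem

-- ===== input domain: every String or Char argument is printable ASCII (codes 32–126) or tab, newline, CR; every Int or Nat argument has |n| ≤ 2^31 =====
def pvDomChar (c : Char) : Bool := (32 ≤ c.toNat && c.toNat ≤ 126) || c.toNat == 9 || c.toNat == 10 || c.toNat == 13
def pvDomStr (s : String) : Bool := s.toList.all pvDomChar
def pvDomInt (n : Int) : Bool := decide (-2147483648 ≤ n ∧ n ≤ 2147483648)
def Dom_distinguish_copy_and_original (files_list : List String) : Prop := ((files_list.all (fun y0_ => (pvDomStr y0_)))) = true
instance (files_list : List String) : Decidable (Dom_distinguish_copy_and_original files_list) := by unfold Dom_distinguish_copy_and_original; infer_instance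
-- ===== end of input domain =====

-- B replaces the two-accumulator partition loop by one stable sort over the boolean
-- key ('copy' in f.lower()); more idiomatic, same return value.

-- ===== PORT A =====
-- literal port: two accumulators, appended in loop order, then original ++ copy
def distinguish_copy_and_original (files_list : List String) : List String :=
  let st := files_list.foldl
    (fun (st : List String × List String) file =>
      if PySem.Str.isIn "copy" (PySem.Str.lower file) then (st.1 ++ [file], st.2)
      else (st.1, st.2 ++ [file]))
    ([], [])
  st.2 ++ st.1

-- ===== PORT B =====
-- literal port: sorted(files_list, key=lambda f: 'copy' in f.lower())
def distinguish_copy_and_original_alt (files_list : List String) : List String :=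
  PySem.List.sorted files_list (fun f => PySem.Str.isIn "copy" (PySem.Str.lower f)) false

-- ===== PRECONDITION & SPEC =====
def Spec_distinguish_copy_and_original (files_list : List String) (out : List String) : Prop := out = distinguish_copy_and_original_alt files_list
instance (files_list : List String) (out : List String) : Decidable (Spec_distinguish_copy_and_original files_list out) := by unfold Spec_distinguish_copy_and_original; infer_instance

-- ===== CLAIM (what is proved, stated in full; the proofs are below) =====
def Claim_equal_distinguish_copy_and_original : Prop := ∀ (files_list : List String), Dom_distinguish_copy_and_original files_list → Spec_distinguish_copy_and_original files_list (distinguish_copy_and_original files_list)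

-- ===== LEMMAS AND PROOFS =====

-- inserting x into F ++ T lands right between them when the comparator refuses
-- every element of F and accepts the head of T
theorem insertBy_mid {α : Type} (b : α → α → Bool) (x : α) (F T : List α)
    (hF : ∀ y ∈ F, b x y = false) (hT : ∀ z zs, T = z :: zs → b x z = true) :
    PySem.List.insertBy b x (F ++ T) = F ++ x :: T := by
  induction F with
  | nil =>
    cases T with
    | nil => simp [PySem.List.insertBy]
    | cons z zs => simp [PySem.List.insertBy, hT z zs rfl]
  | cons f F' ih =>
    simp only [List.cons_append, PySem.List.insertBy, hF f (by simp)]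
    simp [ih (fun y hy => hF y (by simp [hy]))]

-- the insertion-sort loop with a boolean key keeps the accumulator partitioned:
-- false-key elements extend the front block, true-key elements the back block
theorem sortLoop_partition (p : String → Bool) :
    ∀ (xs F T : List String), (∀ y ∈ F, p y = false) → (∀ y ∈ T, p y = true) →
    xs.foldl (fun acc x => PySem.List.insertBy (fun a b => decide (p a < p b)) x acc) (F ++ T)
      = (F ++ xs.filter (fun x => !p x)) ++ (T ++ xs.filter p) := by
  intro xs
  induction xs with
  | nil => intro F T _ _; simp
  | cons x xs ih =>
    intro F T hF hT
    simp only [List.foldl_cons]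
    by_cases hx : p x = true
    · have h1 : PySem.List.insertBy (fun a b => decide (p a < p b)) x (F ++ T)
          = (F ++ T) ++ [x] := by
        apply PySem.List.insertBy_of_forall_not_before
        intro y hy
        rcases List.mem_append.mp hy with h | h
        · simp [hx, hF y h, Bool.lt_iff]
        · simp [hx, hT y h]
      rw [h1, List.append_assoc, ih F (T ++ [x]) hF
        (by intro y hy; rcases List.mem_append.mp hy with h | h
            · exact hT y h
            · rw [List.mem_singleton.mp h]; exact hx)]
      simp [hx]
    · rw [Bool.not_eq_true] at hx
      have h1 : PySem.List.insertBy (fun a b => decide (p a < p b)) x (F ++ T)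
          = F ++ x :: T := by
        apply insertBy_mid
        · intro y hy; simp [hx, hF y hy]
        · intro z zs hz; simp [hx, hT z (by simp [hz]), Bool.lt_iff]
      have h2 : F ++ x :: T = (F ++ [x]) ++ T := by simp
      rw [h1, h2, ih (F ++ [x]) T
        (by intro y hy; rcases List.mem_append.mp hy with h | h
            · exact hF y h
            · rw [List.mem_singleton.mp h]; exact hx) hT]
      simp [hx]

-- A's loop is the pair of filters, in loop order
theorem loopA (p : String → Bool) :
    ∀ (xs c o : List String),
    xs.foldl (fun (st : List String × List String) file =>
        if p file then (st.1 ++ [file], st.2) else (st.1, st.2 ++ [file])) (c, o)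
      = (c ++ xs.filter p, o ++ xs.filter (fun x => !p x)) := by
  intro xs
  induction xs with
  | nil => intro c o; simp
  | cons x xs ih =>
    intro c o
    simp only [List.foldl_cons]
    by_cases hx : p x = true
    · rw [if_pos hx, ih]; simp [hx]
    · rw [if_neg (by simp [hx]), ih]; simp [hx]

-- ===== VERDICT (by name: the statement is the Claim_ definition above) =====
theorem distinguish_copy_and_original_spec : Claim_equal_distinguish_copy_and_original := by
  intro files_list _
  unfold Spec_distinguish_copy_and_original distinguish_copy_and_original
      distinguish_copy_and_original_alt
  rw [PySem.List.sorted_eq_foldl_insertBy]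
  have hB := sortLoop_partition (fun f => PySem.Str.isIn "copy" (PySem.Str.lower f))
      files_list [] [] (by simp) (by simp)
  have hA := loopA (fun f => PySem.Str.isIn "copy" (PySem.Str.lower f)) files_list [] []
  simp only [List.nil_append, List.append_nil] at hB hA
  simp only [hA, hB]
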